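-- pv_equiv track=rewrite | github.com/Manojkumarmk26/chatwithpdf | backend/document_processor/table_extractor.py | _extract_cells_by_position
-- ===== SOURCE A (Python) =====
-- from typing import List, Dict, Any, Tuple, Optional
--
-- def _extract_cells_by_position(line: str, positions: List[int]) -> List[str]:
--     """Extract cells based on column positions"""
--
--     cells = []
--     start = 0
--
--     for pos in positions:
--         if pos > start:
--             cell = line[start:pos].strip()
--             if cell:
--                 cells.append(cell)
--             start = pos
--
--     # Add last cell
--     if start < len(line):
--         cell = line[start:].strip()
--         if cell:
--             cells.append(cell)
--
--     return cells
-- ===== SOURCE B (Python) =====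
-- from typing import List
--
--
-- def _extract_cells_by_position(line: str, positions: List[int]) -> List[str]:
--     """Extract cells by a single left-to-right scan over the CHARACTERS of the
--     line: a pointer into the (prefix-maximum-filtered) cut points is advanced
--     whenever the current index reaches the next cut, flushing the character
--     buffer as a stripped cell; the final buffer is the tail cell."""
--     # effective cut points: strictly increasing prefix maxima of positions
--     cuts = []
--     m = 0
--     for p in positions:
--         if p > m:
--             cuts.append(p)
--             m = p
--
--     cells = []
--     buf = []
--     j = 0
--     for i, ch in enumerate(line):
--         while j < len(cuts) and cuts[j] <= i:
--             cell = "".join(buf).strip()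
--             if cell:
--                 cells.append(cell)
--             buf = []
--             j += 1
--         buf.append(ch)
--     cell = "".join(buf).strip()
--     if cell:
--         cells.append(cell)
--     return cells
-- ===== Notes on version B (the rewrite author's own statement) =====
-- stated objective: alternative
-- what changed: A loops over the positions list and slices the line between successive starts; B instead makes a single character-by-character scan of the line, flushing a character buffer into a cell whenever the index reaches the next effective cut point (cuts precomputed by a prefix-maximum filter).
import Mathlib
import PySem

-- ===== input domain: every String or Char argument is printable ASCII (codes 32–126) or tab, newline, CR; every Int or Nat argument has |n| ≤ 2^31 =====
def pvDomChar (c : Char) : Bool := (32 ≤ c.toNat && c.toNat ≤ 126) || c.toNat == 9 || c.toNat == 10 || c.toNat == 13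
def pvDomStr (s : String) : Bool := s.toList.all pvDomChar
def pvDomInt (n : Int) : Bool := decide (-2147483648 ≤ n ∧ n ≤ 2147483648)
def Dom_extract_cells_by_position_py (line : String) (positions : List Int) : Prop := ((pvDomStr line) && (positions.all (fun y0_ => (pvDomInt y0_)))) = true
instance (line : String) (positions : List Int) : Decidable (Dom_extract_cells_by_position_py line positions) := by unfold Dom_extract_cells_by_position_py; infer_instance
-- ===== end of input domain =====

-- B replaces A's loop over positions (slicing the line between successive starts) with a single
-- left-to-right scan over the CHARACTERS of the line, flushing a character buffer whenever the
-- index reaches the next effective cut point (alternative decomposition, same cost).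


-- ===== PORT A =====
-- literal transliteration of A's single loop: state = (cells, start)
def extract_cells_by_position_py (line : String) (positions : List Int) : List String :=
  let st := positions.foldl (fun (acc : List String × Int) pos =>
    if pos > acc.2 then
      let cell := PySem.Str.strip (PySem.Str.slice line (some acc.2) (some pos))
      ((if cell ≠ "" then acc.1 ++ [cell] else acc.1), pos)
    else acc) ([], 0)
  if st.2 < PySem.Str.len line then
    let cell := PySem.Str.strip (PySem.Str.slice line (some st.2) none)
    if cell ≠ "" then st.1 ++ [cell] else st.1
  else st.1

-- ===== PORT B =====
-- B's inner while loop: pop cuts whose value ≤ current index i, flushing the buffer each time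
-- ("".join(buf) over a list of single chars is String.ofList buf — exact)
def pvFlush (i : Int) : List Int → List String → List Char → List Int × List String × List Char
  | [], cells, buf => ([], cells, buf)
  | c :: rest, cells, buf =>
      if c ≤ i then
        let cell := PySem.Str.strip (String.ofList buf)
        pvFlush i rest (if cell ≠ "" then cells ++ [cell] else cells) []
      else (c :: rest, cells, buf)

-- Source B: pass 1 builds the effective cuts (prefix-maximum filter); then one fold over
-- enumerate(line) with state (remaining cuts, cells, char buffer); then the tail flush.
def extract_cells_by_position_py_alt (line : String) (positions : List Int) : List String :=
  let cm := positions.foldl (fun (acc : List Int × Int) p =>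
      if p > acc.2 then (acc.1 ++ [p], p) else acc) ([], 0)
  let st := (PySem.List.enumerate line.toList 0).foldl
      (fun (st : List Int × List String × List Char) ic =>
        let fl := pvFlush ic.1 st.1 st.2.1 st.2.2
        (fl.1, fl.2.1, fl.2.2 ++ [ic.2])) (cm.1, [], [])
  let cell := PySem.Str.strip (String.ofList st.2.2)
  if cell ≠ "" then st.2.1 ++ [cell] else st.2.1

-- ===== PRECONDITION & SPEC =====
def Spec_extract_cells_by_position_py (line : String) (positions : List Int) (out : List String) : Prop := out = extract_cells_by_position_py_alt line positions
instance (line : String) (positions : List Int) (out : List String) : Decidable (Spec_extract_cells_by_position_py line positions out) := by unfold Spec_extract_cells_by_position_py; infer_instance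

-- ===== CLAIM =====
def Claim_equal_extract_cells_by_position_py : Prop := ∀ (line : String) (positions : List Int), Dom_extract_cells_by_position_py line positions → Spec_extract_cells_by_position_py line positions (extract_cells_by_position_py line positions)

-- ===== LEMMAS AND PROOFS =====

-- effective cut points of the positions list under a running maximum
def pvCutsOf : List Int → Int → List Int
  | [], _ => []
  | p :: ps, m => if p > m then p :: pvCutsOf ps p else pvCutsOf ps m

-- running maximum after the pass
def pvHiOf : List Int → Int → Int
  | [], m => m
  | p :: ps, m => if p > m then pvHiOf ps p else pvHiOf ps m

-- last boundary
def pvLast : Int → List Int → Int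
  | a, [] => a
  | _, b :: rest => pvLast b rest

-- the cells contributed by A's slicing, starting at boundary a
def pvSeg (line : String) : Int → List Int → List String
  | _, [] => []
  | a, b :: rest =>
      (let c := PySem.Str.strip (PySem.Str.slice line (some a) (some b))
       if c ≠ "" then [c] else []) ++ pvSeg line b rest

-- common character-level form: cells of the segments cut at `cuts`, starting at char index s
def pvCells (L : List Char) : Nat → List Int → List String
  | s, [] =>
      let c := PySem.Str.strip (String.ofList (L.drop s))
      if c ≠ "" then [c] else []
  | s, b :: rest =>
      (let c := PySem.Str.strip (String.ofList ((L.drop s).take (b.toNat - s)))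
       if c ≠ "" then [c] else []) ++ pvCells L b.toNat rest

theorem pvMem_cutsOf {ps : List Int} {m c : Int} (h : c ∈ pvCutsOf ps m) : m < c := by
  induction ps generalizing m with
  | nil => simp [pvCutsOf] at h
  | cons p ps ih =>
      simp only [pvCutsOf] at h
      split at h
      · rcases List.mem_cons.mp h with rfl | h'
        · assumption
        · exact lt_trans (by assumption) (ih h')
      · exact ih h

theorem pvPairwise_cutsOf (ps : List Int) (m : Int) : (pvCutsOf ps m).Pairwise (· < ·) := by
  induction ps generalizing m with
  | nil => simp [pvCutsOf]
  | cons p ps ih =>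
      simp only [pvCutsOf]
      split
      · exact List.pairwise_cons.mpr ⟨fun c hc => pvMem_cutsOf hc, ih p⟩
      · exact ih m

-- B's pass 1 fold computes pvCutsOf / pvHiOf
theorem pvPass1 (ps : List Int) (acc : List Int) (m : Int) :
    ps.foldl (fun (acc : List Int × Int) p => if p > acc.2 then (acc.1 ++ [p], p) else acc) (acc, m)
      = (acc ++ pvCutsOf ps m, pvHiOf ps m) := by
  induction ps generalizing acc m with
  | nil => simp [pvCutsOf, pvHiOf]
  | cons p ps ih =>
      simp only [List.foldl_cons, pvCutsOf, pvHiOf]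
      split <;> simp [ih]

-- A's fold over positions
theorem pvFoldA (line : String) (ps : List Int) (start : Int) (cells : List String) :
    ps.foldl (fun (acc : List String × Int) pos =>
      if pos > acc.2 then
        let cell := PySem.Str.strip (PySem.Str.slice line (some acc.2) (some pos))
        ((if cell ≠ "" then acc.1 ++ [cell] else acc.1), pos)
      else acc) (cells, start)
    = (cells ++ pvSeg line start (pvCutsOf ps start), pvLast start (pvCutsOf ps start)) := by
  induction ps generalizing start cells with
  | nil => simp [pvCutsOf, pvSeg, pvLast]
  | cons p ps ih =>
      simp only [List.foldl_cons, pvCutsOf]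
      by_cases h : p > start
      · simp only [if_pos h, ih, pvSeg, pvLast]
        split <;> simp
      · simp only [if_neg h, ih]


-- A's segments + tail step equal the character-level cells
theorem pvSegTail (line : String) (cs : List Int) (s : Nat) (h : ∀ c ∈ cs, 0 ≤ c) :
    (if pvLast (s : Int) cs < PySem.Str.len line then
      (let cell := PySem.Str.strip (PySem.Str.slice line (some (pvLast (s : Int) cs)) none)
       if cell ≠ "" then pvSeg line (s : Int) cs ++ [cell] else pvSeg line (s : Int) cs)
     else pvSeg line (s : Int) cs) = pvCells line.toList s cs := by
  induction cs generalizing s with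
  | nil =>
      simp only [pvSeg, pvLast, pvCells]
      by_cases hl : (s : Int) < PySem.Str.len line
      · rw [if_pos hl]
        have hsl : PySem.Str.slice line (some (s : Int)) none
            = String.ofList (line.toList.drop s) := by
          simp [PySem.Str.slice, PySem.List.slice_from _ (Int.natCast_nonneg s)]
        rw [hsl]
        split <;> simp
      · rw [if_neg hl]
        have hlen : line.toList.length ≤ s := by
          simp only [pysem] at hl; omega
        rw [List.drop_eq_nil_of_le hlen]
        have : PySem.Str.strip (String.ofList []) = "" := by decide
        simp [this]
  | cons b rest ih =>
      have hb : 0 ≤ b := h b (List.mem_cons_self ..)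
      have hrest : ∀ c ∈ rest, 0 ≤ c := fun c hc => h c (List.mem_cons_of_mem _ hc)
      simp only [pvSeg, pvLast, pvCells]
      have hsl : PySem.Str.slice line (some (s : Int)) (some b)
          = String.ofList ((line.toList.drop s).take (b.toNat - s)) := by
        simp [PySem.Str.slice, PySem.List.slice_toNat _ (Int.natCast_nonneg s) hb]
      rw [hsl]
      have hcast : ((b.toNat : Nat) : Int) = b := Int.toNat_of_nonneg hb
      have ih' := ih b.toNat hrest
      rw [hcast] at ih'
      rw [← ih']
      split
      · split <;> simp_all
      · rfl

-- all remaining cuts are past the end of the line: only the tail cell can contribute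
theorem pvCellsHi (L : List Char) (cs : List Int) (s : Nat)
    (h : ∀ c ∈ cs, (L.length : Int) ≤ c) :
    pvCells L s cs = (let c := PySem.Str.strip (String.ofList (L.drop s)); if c ≠ "" then [c] else []) := by
  induction cs generalizing s with
  | nil => rfl
  | cons b rest ih =>
      have hb : (L.length : Int) ≤ b := h b (List.mem_cons_self ..)
      simp only [pvCells]
      have htake : (L.drop s).take (b.toNat - s) = L.drop s :=
        List.take_of_length_le (by rw [List.length_drop]; omega)
      rw [htake, ih b.toNat (fun c hc => h c (List.mem_cons_of_mem _ hc))]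
      have hdrop : L.drop b.toNat = [] := List.drop_eq_nil_of_le (by omega)
      rw [hdrop]
      have hstrip : PySem.Str.strip (String.ofList []) = "" := by decide
      simp [hstrip]

-- single steps of the while loop
theorem pvFlush_nil (i : Int) (cells : List String) (buf : List Char) :
    pvFlush i [] cells buf = ([], cells, buf) := rfl

theorem pvFlush_cons_le {i c : Int} (h : c ≤ i) (rest : List Int) (cells : List String) (buf : List Char) :
    pvFlush i (c :: rest) cells buf
      = pvFlush i rest (if PySem.Str.strip (String.ofList buf) ≠ ""
          then cells ++ [PySem.Str.strip (String.ofList buf)] else cells) [] := by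
  simp [pvFlush, h]

-- the while loop stops immediately when every remaining cut is beyond i
theorem pvFlush_none (i : Int) (cs : List Int) (cells : List String) (buf : List Char)
    (h : ∀ c ∈ cs, i < c) : pvFlush i cs cells buf = (cs, cells, buf) := by
  cases cs with
  | nil => rfl
  | cons c rest => simp [pvFlush, not_le.mpr (h c (List.mem_cons_self ..))]

-- B's character fold, with the final flush, computes the character-level cells
set_option maxHeartbeats 1000000 in
theorem pvFoldB (L : List Char) (suf : List Char) (k s : Nat) (cs : List Int) (cells : List String)
    (hsuf : suf = L.drop k) (hs : s ≤ k)
    (hge : ∀ c ∈ cs, (k : Int) ≤ c) (hpw : cs.Pairwise (· < ·)) :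
    (let st := (PySem.List.enumerate suf (k : Int)).foldl
        (fun (st : List Int × List String × List Char) ic =>
          let fl := pvFlush ic.1 st.1 st.2.1 st.2.2
          (fl.1, fl.2.1, fl.2.2 ++ [ic.2])) (cs, cells, (L.drop s).take (k - s))
     let cell := PySem.Str.strip (String.ofList st.2.2)
     if cell ≠ "" then st.2.1 ++ [cell] else st.2.1) = cells ++ pvCells L s cs := by
  induction suf generalizing k s cs cells with
  | nil =>
      have hk : L.length ≤ k := by
        have := congrArg List.length hsuf; simp at this; omega
      simp only [PySem.List.enumerate_nil, List.foldl_nil]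
      have htake : (L.drop s).take (k - s) = L.drop s :=
        List.take_of_length_le (by rw [List.length_drop]; omega)
      rw [htake, pvCellsHi L cs s (fun c hc => le_trans (by exact_mod_cast hk) (hge c hc))]
      by_cases hc : PySem.Str.strip (String.ofList (L.drop s)) = "" <;> simp [hc]
  | cons ch rest ih =>
      have hk : k < L.length := by
        by_contra hnk
        rw [List.drop_eq_nil_of_le (by omega)] at hsuf
        exact List.cons_ne_nil _ _ hsuf
      have hget : L[k]? = some ch := by
        have : (L.drop k)[0]? = some ch := by rw [← hsuf]; rfl
        rwa [List.getElem?_drop, Nat.add_zero] at this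
      have hrest : rest = L.drop (k + 1) := by
        have h := congrArg List.tail hsuf
        simp only [List.tail_cons, List.tail_drop] at h
        exact h
      have hsnoc : ∀ t : Nat, t ≤ k →
          (L.drop t).take (k - t) ++ [ch] = (L.drop t).take (k + 1 - t) := by
        intro t ht
        have h1 : k + 1 - t = (k - t) + 1 := by omega
        rw [h1, List.take_add_one, List.getElem?_drop]
        have h2 : t + (k - t) = k := by omega
        rw [h2, hget]
        rfl
      have hc1 : ((k : Int) + 1) = ((k + 1 : Nat) : Int) := by push_cast; ring
      rw [PySem.List.enumerate_cons]
      simp only [List.foldl_cons]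
      cases cs with
      | nil =>
          rw [pvFlush_nil]
          simp only []
          rw [hsnoc s hs, hc1]
          exact ih (k + 1) s [] cells hrest (by omega) (by simp) (by simp)
      | cons c rest' =>
          have hkc : (k : Int) ≤ c := hge c (List.mem_cons_self ..)
          have hpw' : rest'.Pairwise (· < ·) := (List.pairwise_cons.mp hpw).2
          have hcr : ∀ r ∈ rest', c < r := (List.pairwise_cons.mp hpw).1
          by_cases hck : c ≤ (k : Int)
          · -- flush fires exactly once: c = k
            have hc : c = (k : Int) := le_antisymm hck hkc
            rw [pvFlush_cons_le hck]
            rw [pvFlush_none (k : Int) rest' _ [] (fun r hr => hc ▸ hcr r hr)]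
            simp only [List.nil_append]
            have hch : [ch] = (L.drop k).take (k + 1 - k) := by
              rw [← hsnoc k (le_refl k)]
              simp
            rw [hch, hc1]
            have h1 := ih (k + 1) k rest'
              (if PySem.Str.strip (String.ofList ((L.drop s).take (k - s))) ≠ ""
               then cells ++ [PySem.Str.strip (String.ofList ((L.drop s).take (k - s)))] else cells)
              hrest (by omega)
              (fun r hr => by have := hcr r hr; rw [hc] at this; push_cast; omega) hpw'
            rw [h1]
            have hcn : c.toNat = k := by omega
            simp only [pvCells, hcn]
            split <;> simp
          · -- cut beyond this index: no flush
            rw [pvFlush_none (k : Int) (c :: rest') _ _ (fun r hr => by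
              rcases List.mem_cons.mp hr with rfl | hr'
              · exact lt_of_not_ge hck
              · exact lt_of_le_of_lt hkc (hcr r hr'))]
            simp only []
            rw [hsnoc s hs, hc1]
            refine ih (k + 1) s (c :: rest') cells hrest (by omega) ?_ hpw
            intro r hr
            rcases List.mem_cons.mp hr with rfl | hr'
            · push_cast; omega
            · have := hcr r hr'
              push_cast; omega

-- ===== VERDICT =====
theorem extract_cells_by_position_py_spec : Claim_equal_extract_cells_by_position_py := by
  intro line positions _
  unfold Spec_extract_cells_by_position_py
  unfold extract_cells_by_position_py extract_cells_by_position_py_alt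
  dsimp only []
  rw [pvFoldA, pvPass1]
  dsimp only []
  simp only [List.nil_append]
  have h0 : ∀ c ∈ pvCutsOf positions 0, (0 : Int) ≤ c := fun c hc => le_of_lt (pvMem_cutsOf hc)
  have hB := pvFoldB line.toList line.toList 0 0 (pvCutsOf positions 0) []
    (by simp) (le_refl 0) h0 (pvPairwise_cutsOf positions 0)
  have hA := pvSegTail line (pvCutsOf positions 0) 0 h0
  simp only [Nat.cast_zero, Nat.sub_zero, List.drop_zero, List.take_zero, List.nil_append] at hA hB
  exact hA.trans hB.symm
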